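-- pv_equiv track=rewrite | github.com/mohisyed/school | cmsc201spring/project3/silicon_crisis.py | query
-- ===== SOURCE A (Python) =====
-- def query(recipes, select_material, product_material):
--     count = 0
--     if product_material in recipes:
--         for key, value in recipes[product_material]['part'].items():
--             if select_material == key:
--                 count += value
--             else:
--                 count += value * query(recipes, select_material, key)
--     return count
-- ===== SOURCE B (Python) =====
-- def query(recipes, select_material, product_material):
--     # Memoized top-down DP over the dependency DAG: each material's count is
--     # computed once and cached, instead of A's naive re-recursion per reference.
--     memo = {}
--
--     def count(m):
--         if m in memo:
--             return memo[m]
--         if m not in recipes: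
--             return 0
--         total = 0
--         for part, qty in recipes[m]['part'].items():
--             total += qty * (1 if part == select_material else count(part))
--         memo[m] = total
--         return total
--
--     return count(product_material)
-- ===== Notes on version B (the rewrite author's own statement) =====
-- stated objective: alternative
-- what changed: Replaces A's naive recursion (which re-evaluates shared sub-recipes) with memoized top-down dynamic programming over the dependency DAG, caching each material's count once; Pre_ excludes recipe dicts with a cycle over non-select-material edges (A's recursion never returns there) and inputs where the product recipe or a referenced recipe lacks a 'part' entry (A raises KeyError when it reaches one; both conditions are static over-approximations, so a few inputs with an unreachable cycle or unreachable 'part'-less recipe, on which A returns the same value as B, are excluded too).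
-- outside the precondition, e.g. on query({'a': {'part': {'b': 1}}, 'c': {'part': {'c': 1}}}, 'x', 'a'): A returns 0, B returns 0; on query({'a': {'part': {'s': 2}}, 'b': {'part': {'c': 1}}, 'c': {}}, 's', 'a'): A returns 2, B returns 2
import Mathlib
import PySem

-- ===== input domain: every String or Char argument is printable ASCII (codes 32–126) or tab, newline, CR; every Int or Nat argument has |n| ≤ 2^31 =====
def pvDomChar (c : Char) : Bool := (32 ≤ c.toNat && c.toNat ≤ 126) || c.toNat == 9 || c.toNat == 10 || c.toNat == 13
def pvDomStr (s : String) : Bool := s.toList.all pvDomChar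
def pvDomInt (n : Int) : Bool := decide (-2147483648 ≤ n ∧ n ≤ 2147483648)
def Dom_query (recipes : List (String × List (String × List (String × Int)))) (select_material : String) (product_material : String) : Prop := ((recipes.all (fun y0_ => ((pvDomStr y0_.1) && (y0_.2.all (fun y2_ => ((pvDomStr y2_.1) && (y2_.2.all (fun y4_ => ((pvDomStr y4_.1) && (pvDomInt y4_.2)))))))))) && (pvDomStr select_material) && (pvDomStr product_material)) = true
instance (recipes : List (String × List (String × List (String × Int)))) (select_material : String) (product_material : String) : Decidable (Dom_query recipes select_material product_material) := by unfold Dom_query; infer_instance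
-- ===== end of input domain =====

-- B replaces A's naive recursion over the dependency graph by memoized top-down
-- dynamic programming that caches each material's count once (objective: alternative).

-- ===== PORT A =====
-- fuel is only a totality guard: Pre_query (acyclicity) bounds the recursion depth
def queryFuel (fuel : Nat) (d : PySem.Dict String (List (String × List (String × Int))))
    (select_material : String) (product_material : String) : Int :=
  match fuel with
  | 0 => 0
  | Nat.succ f =>
    match d.get? product_material with                      -- 'if product_material in recipes'
    | none => 0
    | some body =>
      match (PySem.Dict.ofList body).get? "part" with       -- recipes[product_material]['part']
      | none => 0                                           -- Python raises KeyError here; Pre_query excludes such inputs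
      | some part =>
        (PySem.Dict.ofList part).items.foldl
          (fun count kv =>
            if select_material == kv.1 then count + kv.2
            else count + kv.2 * queryFuel f d select_material kv.1) 0

def query (recipes : List (String × List (String × List (String × Int)))) (select_material : String) (product_material : String) : Int :=
  queryFuel ((PySem.Dict.ofList recipes).size + 1) (PySem.Dict.ofList recipes) select_material product_material

-- ===== PORT B =====
-- the inner 'count' of Source B: returns the value together with the updated memo dict;
-- fuel is only a totality guard: Pre_query (acyclicity) bounds the recursion depth
def countMemo (d : PySem.Dict String (List (String × List (String × Int)))) (sel : String) :
    Nat → PySem.Dict String Int → String → Int × PySem.Dict String Int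
  | 0, memo, _ => (0, memo)
  | Nat.succ f, memo, m =>
    match memo.get? m with                                  -- 'if m in memo: return memo[m]'
    | some v => (v, memo)
    | none =>
      match d.get? m with                                   -- 'if m not in recipes: return 0'
      | none => (0, memo)
      | some body =>
        match (PySem.Dict.ofList body).get? "part" with     -- recipes[m]['part']
        | none => (0, memo)                                 -- Python raises KeyError here; Pre_query excludes such inputs
        | some part =>
          let r := (PySem.Dict.ofList part).items.foldl
            (fun tm kv =>
              if kv.1 == sel then (tm.1 + kv.2 * 1, tm.2)
              else
                let rc := countMemo d sel f tm.2 kv.1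
                (tm.1 + kv.2 * rc.1, rc.2))
            (0, memo)
          (r.1, r.2.insert m r.1)                           -- 'memo[m] = total; return total'

def query_alt (recipes : List (String × List (String × List (String × Int)))) (select_material : String) (product_material : String) : Int :=
  (countMemo (PySem.Dict.ofList recipes) select_material
    ((PySem.Dict.ofList recipes).size + 1) PySem.Dict.empty product_material).1

-- ===== PRECONDITION & SPEC =====
-- the 'part' table of a recipe body, as Python iterates it
def pvParts (body : List (String × List (String × Int))) : List (String × Int) :=
  (PySem.Dict.ofList ((PySem.Dict.ofList body).getD "part" [])).items

-- Acyclicity test on the INPUT's part-dependency graph (it computes no counts and is not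
-- the algorithm): one peeling round keeps only the entries that still reference a remaining
-- key other than select_material; iterating it empties the list iff that edge graph is acyclic.
def pvStep (sel : String) (l : List (String × List (String × List (String × Int)))) :
    List (String × List (String × List (String × Int))) :=
  l.filter (fun e => (pvParts e.2).any (fun kv => !(kv.1 == sel) && l.any (fun e' => e'.1 == kv.1)))

def pvElim (sel : String) : Nat → List (String × List (String × List (String × Int))) →
    List (String × List (String × List (String × Int)))
  | 0, l => l
  | Nat.succ s, l => pvStep sel (pvElim sel s l)

-- Pre_query excludes (a) recipe dicts whose key-to-part-key edges (other than edges into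
-- select_material, which A never follows) contain a cycle — there A's recursion never returns
-- (RecursionError) — and (b) inputs where the recipe named by product_material or by some 'part'
-- table (other than select_material) has no 'part' entry, on which A raises KeyError when it
-- reaches that recipe; both are static over-approximations, so a few inputs with an unreachable
-- cycle or an unreachable 'part'-less recipe, on which A returns, are excluded too.
def Pre_query (recipes : List (String × List (String × List (String × Int)))) (select_material : String) (product_material : String) : Prop :=
  pvElim select_material (PySem.Dict.ofList recipes).items.length (PySem.Dict.ofList recipes).items = [] ∧
  ∀ e ∈ (PySem.Dict.ofList recipes).items,
    (e.1 = product_material ∨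
      ∃ e' ∈ (PySem.Dict.ofList recipes).items, ∃ kv ∈ pvParts e'.2, kv.1 = e.1 ∧ kv.1 ≠ select_material) →
    "part" ∈ e.2.map Prod.fst
instance (recipes : List (String × List (String × List (String × Int)))) (select_material : String) (product_material : String) : Decidable (Pre_query recipes select_material product_material) := by unfold Pre_query; infer_instance

def pvWitness_query : (List (String × List (String × List (String × Int)))) × String × String :=
  ([("cpu", [("part", [("chip", 2), ("board", 1)])]),
    ("board", [("part", [("silicon", 1), ("chip", 2)])]),
    ("chip", [("part", [("silicon", 3)])])],
   "silicon", "cpu")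

def Spec_query (recipes : List (String × List (String × List (String × Int)))) (select_material : String) (product_material : String) (out : Int) : Prop := out = query_alt recipes select_material product_material
instance (recipes : List (String × List (String × List (String × Int)))) (select_material : String) (product_material : String) (out : Int) : Decidable (Spec_query recipes select_material product_material out) := by unfold Spec_query; infer_instance

-- ===== CLAIM (what is proved, stated in full; the proofs are below) =====
def Claim_equal_query : Prop := ∀ (recipes : List (String × List (String × List (String × Int)))) (select_material : String) (product_material : String), Dom_query recipes select_material product_material → Pre_query recipes select_material product_material → Spec_query recipes select_material product_material (query recipes select_material product_material)

-- ===== LEMMAS AND PROOFS =====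

-- one-step unfolding lemmas for the two fueled recursions (fuel kept a variable so that
-- rewriting never unfolds nested recursive calls)
theorem queryFuel_succ_none (f : Nat) (d : PySem.Dict String (List (String × List (String × Int))))
    (sel m : String) (hget : d.get? m = none) : queryFuel (f+1) d sel m = 0 := by
  simp [queryFuel, hget]

theorem queryFuel_succ_nopart (f : Nat) (d : PySem.Dict String (List (String × List (String × Int))))
    (sel m : String) (b : List (String × List (String × Int)))
    (hget : d.get? m = some b) (hpart : (PySem.Dict.ofList b).get? "part" = none) :
    queryFuel (f+1) d sel m = 0 := by
  simp [queryFuel, hget, hpart]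

theorem queryFuel_succ_part (f : Nat) (d : PySem.Dict String (List (String × List (String × Int))))
    (sel m : String) (b : List (String × List (String × Int))) (part : List (String × Int))
    (hget : d.get? m = some b) (hpart : (PySem.Dict.ofList b).get? "part" = some part) :
    queryFuel (f+1) d sel m =
      (PySem.Dict.ofList part).items.foldl
        (fun c kv => if sel == kv.1 then c + kv.2 else c + kv.2 * queryFuel f d sel kv.1) 0 := by
  simp [queryFuel, hget, hpart]

theorem countMemo_succ_hit (d : PySem.Dict String (List (String × List (String × Int))))
    (sel : String) (f : Nat) (memo : PySem.Dict String Int) (m : String) (v : Int)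
    (hm : memo.get? m = some v) : countMemo d sel (f+1) memo m = (v, memo) := by
  simp [countMemo, hm]

theorem countMemo_succ_none (d : PySem.Dict String (List (String × List (String × Int))))
    (sel : String) (f : Nat) (memo : PySem.Dict String Int) (m : String)
    (hm : memo.get? m = none) (hget : d.get? m = none) :
    countMemo d sel (f+1) memo m = (0, memo) := by
  simp [countMemo, hm, hget]

theorem countMemo_succ_nopart (d : PySem.Dict String (List (String × List (String × Int))))
    (sel : String) (f : Nat) (memo : PySem.Dict String Int) (m : String)
    (b : List (String × List (String × Int)))
    (hm : memo.get? m = none) (hget : d.get? m = some b)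
    (hpart : (PySem.Dict.ofList b).get? "part" = none) :
    countMemo d sel (f+1) memo m = (0, memo) := by
  simp [countMemo, hm, hget, hpart]

theorem countMemo_succ_part (d : PySem.Dict String (List (String × List (String × Int))))
    (sel : String) (f : Nat) (memo : PySem.Dict String Int) (m : String)
    (b : List (String × List (String × Int))) (part : List (String × Int))
    (hm : memo.get? m = none) (hget : d.get? m = some b)
    (hpart : (PySem.Dict.ofList b).get? "part" = some part) :
    countMemo d sel (f+1) memo m =
      (((PySem.Dict.ofList part).items.foldl
          (fun tm kv =>
            if kv.1 == sel then (tm.1 + kv.2 * 1, tm.2)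
            else (tm.1 + kv.2 * (countMemo d sel f tm.2 kv.1).1,
                  (countMemo d sel f tm.2 kv.1).2)) (0, memo)).1,
       ((PySem.Dict.ofList part).items.foldl
          (fun tm kv =>
            if kv.1 == sel then (tm.1 + kv.2 * 1, tm.2)
            else (tm.1 + kv.2 * (countMemo d sel f tm.2 kv.1).1,
                  (countMemo d sel f tm.2 kv.1).2)) (0, memo)).2.insert m
        ((PySem.Dict.ofList part).items.foldl
          (fun tm kv =>
            if kv.1 == sel then (tm.1 + kv.2 * 1, tm.2)
            else (tm.1 + kv.2 * (countMemo d sel f tm.2 kv.1).1,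
                  (countMemo d sel f tm.2 kv.1).2)) (0, memo)).1) := by
  simp [countMemo, hm, hget, hpart]

theorem pvElim_sublist_le (sel : String) (l : List (String × List (String × List (String × Int))))
    {s t : Nat} (h : s ≤ t) : (pvElim sel t l).Sublist (pvElim sel s l) := by
  induction h with
  | refl => exact List.Sublist.refl _
  | step _ ih => exact List.Sublist.trans (List.filter_sublist) ih

theorem pvElim_removed (sel : String) (l : List (String × List (String × List (String × Int))))
    (s : Nat) (e : String × List (String × List (String × Int)))
    (he : e ∈ pvElim sel s l) (hout : e ∉ pvElim sel (s+1) l)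
    (kv : String × Int) (hkv : kv ∈ pvParts e.2) (hsel : (kv.1 == sel) = false) :
    ∀ e' ∈ pvElim sel s l, e'.1 ≠ kv.1 := by
  intro e' he' heq
  apply hout
  show e ∈ pvStep sel (pvElim sel s l)
  rw [pvStep, List.mem_filter]
  refine ⟨he, ?_⟩
  rw [List.any_eq_true]
  refine ⟨kv, hkv, ?_⟩
  rw [Bool.and_eq_true]
  constructor
  · simp [hsel]
  · rw [List.any_eq_true]
    exact ⟨e', he', by simp [heq]⟩

theorem pvElim_crossing (sel : String) (l : List (String × List (String × List (String × Int))))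
    (e : String × List (String × List (String × Int))) (he : e ∈ l) :
    ∀ n : Nat, e ∉ pvElim sel n l → ∃ r, e ∈ pvElim sel r l ∧ e ∉ pvElim sel (r+1) l ∧ r + 1 ≤ n := by
  intro n
  induction n with
  | zero => intro h; exact absurd he h
  | succ k ih =>
    intro h
    by_cases hk : e ∈ pvElim sel k l
    · exact ⟨k, hk, h, le_refl _⟩
    · obtain ⟨r, h1, h2, h3⟩ := ih hk
      exact ⟨r, h1, h2, Nat.le_succ_of_le h3⟩

theorem pv_no_entry_get?_none (d : PySem.Dict String (List (String × List (String × Int))))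
    (m : String) (hm : ∀ b, (m, b) ∉ d.items) : d.get? m = none := by
  rw [PySem.Dict.get?_eq_none_iff_not_mem_keys]
  intro hmem
  simp only [PySem.Dict.keys, List.mem_map] at hmem
  obtain ⟨e, he, hek⟩ := hmem
  exact hm e.2 (by rw [show (m, e.2) = e from by cases e; simp_all]; exact he)

-- A-side: once a material has been eliminated after r rounds, queryFuel no longer depends
-- on the fuel, as long as the fuel exceeds r
theorem pv_stable (d : PySem.Dict String (List (String × List (String × Int)))) (sel : String)
    (hnd : d.keys.Nodup) :
    ∀ (r : Nat) (m : String), (∀ b, (m, b) ∉ pvElim sel r d.items) →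
      ∀ f1 f2, r ≤ f1 → r ≤ f2 → queryFuel (f1+1) d sel m = queryFuel (f2+1) d sel m := by
  intro r
  induction r with
  | zero =>
    intro m hm f1 f2 _ _
    have hget : d.get? m = none := pv_no_entry_get?_none d m hm
    rw [queryFuel_succ_none f1 d sel m hget, queryFuel_succ_none f2 d sel m hget]
  | succ r ih =>
    intro m hm f1 f2 hf1 hf2
    by_cases hmr : ∃ b, (m, b) ∈ pvElim sel r d.items
    · obtain ⟨b, hb⟩ := hmr
      have hout : (m, b) ∉ pvElim sel (r+1) d.items := hm b
      have hget : d.get? m = some b :=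
        PySem.Dict.get?_of_mem_items d ((pvElim_sublist_le sel d.items (Nat.zero_le r)).subset hb) hnd
      cases hpart : (PySem.Dict.ofList b).get? "part" with
      | none =>
        rw [queryFuel_succ_nopart f1 d sel m b hget hpart,
            queryFuel_succ_nopart f2 d sel m b hget hpart]
      | some part =>
        have hparts : pvParts b = (PySem.Dict.ofList part).items := by
          unfold pvParts
          rw [PySem.Dict.getD_eq_get?_getD, hpart]
          rfl
        rw [queryFuel_succ_part f1 d sel m b part hget hpart,
            queryFuel_succ_part f2 d sel m b part hget hpart]
        apply PySem.List.foldl_congr_mem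
        intro acc kv hkv
        by_cases hs : (sel == kv.1) = true
        · rw [if_pos hs, if_pos hs]
        · rw [if_neg hs, if_neg hs]
          have hsel : (kv.1 == sel) = false := by
            rw [beq_eq_false_iff_ne]
            intro h
            exact hs (by rw [beq_iff_eq]; exact h.symm)
          have hrem := pvElim_removed sel d.items r (m, b) hb hout kv (hparts ▸ hkv) hsel
          have hnok : ∀ b', (kv.1, b') ∉ pvElim sel r d.items := by
            intro b' hb'
            exact hrem (kv.1, b') hb' rfl
          obtain ⟨g1, hg1⟩ : ∃ g, f1 = g + 1 := ⟨f1 - 1, by omega⟩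
          obtain ⟨g2, hg2⟩ : ∃ g, f2 = g + 1 := ⟨f2 - 1, by omega⟩
          rw [hg1, hg2, ih kv.1 hnok g1 g2 (by omega) (by omega)]
    · exact ih m (fun b hb => hmr ⟨b, hb⟩) f1 f2 (by omega) (by omega)

-- with acyclicity, queryFuel at m unfolds to the fold whose recursive values are again
-- taken at the canonical fuel (d.items.length + 1)
theorem pv_unfold (d : PySem.Dict String (List (String × List (String × Int)))) (sel : String)
    (hnd : d.keys.Nodup) (hpre : pvElim sel d.items.length d.items = [])
    (m : String) (b : List (String × List (String × Int)))
    (part : List (String × Int))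
    (hget : d.get? m = some b) (hpart : (PySem.Dict.ofList b).get? "part" = some part) :
    queryFuel (d.items.length + 1) d sel m =
      (PySem.Dict.ofList part).items.foldl
        (fun c kv => if sel == kv.1 then c + kv.2
          else c + kv.2 * queryFuel (d.items.length + 1) d sel kv.1) 0 := by
  have hmem : (m, b) ∈ d.items := PySem.Dict.mem_items_of_get?_eq_some d hget
  have hnot : (m, b) ∉ pvElim sel d.items.length d.items := by rw [hpre]; simp
  obtain ⟨r, hin, hout, hrn⟩ := pvElim_crossing sel d.items (m, b) hmem d.items.length hnot
  have hparts : pvParts b = (PySem.Dict.ofList part).items := by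
    unfold pvParts
    rw [PySem.Dict.getD_eq_get?_getD, hpart]
    rfl
  rw [queryFuel_succ_part d.items.length d sel m b part hget hpart]
  apply PySem.List.foldl_congr_mem
  intro acc kv hkv
  by_cases hs : (sel == kv.1) = true
  · rw [if_pos hs, if_pos hs]
  · rw [if_neg hs, if_neg hs]
    have hsel : (kv.1 == sel) = false := by
      rw [beq_eq_false_iff_ne]
      intro h
      exact hs (by rw [beq_iff_eq]; exact h.symm)
    have hrem := pvElim_removed sel d.items r (m, b) hin hout kv (hparts ▸ hkv) hsel
    have hnok : ∀ b', (kv.1, b') ∉ pvElim sel r d.items := by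
      intro b' hb'
      exact hrem (kv.1, b') hb' rfl
    obtain ⟨g, hg⟩ : ∃ g, d.items.length = g + 1 := ⟨d.items.length - 1, by omega⟩
    have hstep := pv_stable d sel hnd r kv.1 hnok g d.items.length (by omega) (by omega)
    rw [← hg] at hstep
    rw [hstep]

-- the memo invariant: every cached value is the canonical (A-side) value
def pvInv (d : PySem.Dict String (List (String × List (String × Int)))) (sel : String)
    (memo : PySem.Dict String Int) : Prop :=
  ∀ k v, memo.get? k = some v → v = queryFuel (d.items.length + 1) d sel k

-- B-side fold: threading the memo through the per-part loop computes the A-side fold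
theorem pv_fold (d : PySem.Dict String (List (String × List (String × Int)))) (sel : String)
    (g : Nat)
    (ps : List (String × Int))
    (Hrec : ∀ kv ∈ ps, (kv.1 == sel) = false → ∀ memo₀, pvInv d sel memo₀ →
      (countMemo d sel g memo₀ kv.1).1 = queryFuel (d.items.length + 1) d sel kv.1 ∧
      pvInv d sel (countMemo d sel g memo₀ kv.1).2) :
    ∀ (t : Int) (memo₀ : PySem.Dict String Int), pvInv d sel memo₀ →
      (ps.foldl (fun tm kv =>
          if kv.1 == sel then (tm.1 + kv.2 * 1, tm.2)
          else (tm.1 + kv.2 * (countMemo d sel g tm.2 kv.1).1,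
                (countMemo d sel g tm.2 kv.1).2)) (t, memo₀)).1 =
        ps.foldl (fun c kv => if sel == kv.1 then c + kv.2
          else c + kv.2 * queryFuel (d.items.length + 1) d sel kv.1) t ∧
      pvInv d sel
        (ps.foldl (fun tm kv =>
          if kv.1 == sel then (tm.1 + kv.2 * 1, tm.2)
          else (tm.1 + kv.2 * (countMemo d sel g tm.2 kv.1).1,
                (countMemo d sel g tm.2 kv.1).2)) (t, memo₀)).2 := by
  induction ps with
  | nil => intro t memo₀ hinv; exact ⟨rfl, hinv⟩
  | cons kv rest ih =>
    intro t memo₀ hinv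
    by_cases hs : (kv.1 == sel) = true
    · have hs' : (sel == kv.1) = true := by
        rw [beq_iff_eq] at hs ⊢; exact hs.symm
      simp only [List.foldl_cons, if_pos hs, if_pos hs']
      rw [show kv.2 * 1 = kv.2 from mul_one _]
      exact ih (fun kv' h => Hrec kv' (List.mem_cons_of_mem _ h)) (t + kv.2) memo₀ hinv
    · have hs' : ¬ (sel == kv.1) = true := by
        intro h
        rw [beq_iff_eq] at h
        exact hs (by rw [beq_iff_eq]; exact h.symm)
      obtain ⟨hv, hinv'⟩ := Hrec kv (List.mem_cons_self) (by simpa using hs) memo₀ hinv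
      simp only [List.foldl_cons, if_neg hs, if_neg hs', hv]
      exact ih (fun kv' h => Hrec kv' (List.mem_cons_of_mem _ h)) (t + kv.2 * queryFuel (d.items.length + 1) d sel kv.1) _ hinv'

-- B-side: with enough fuel, countMemo returns the canonical value and preserves the invariant
theorem pv_memo (d : PySem.Dict String (List (String × List (String × Int)))) (sel : String)
    (hnd : d.keys.Nodup) (hpre : pvElim sel d.items.length d.items = []) :
    ∀ (r : Nat) (m : String), (∀ b, (m, b) ∉ pvElim sel r d.items) →
      ∀ memo, pvInv d sel memo → ∀ f, r ≤ f →
        (countMemo d sel (f+1) memo m).1 = queryFuel (d.items.length + 1) d sel m ∧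
        pvInv d sel (countMemo d sel (f+1) memo m).2 := by
  intro r
  induction r with
  | zero =>
    intro m hm memo hinv f _
    cases hmemo : memo.get? m with
    | some v =>
      rw [countMemo_succ_hit d sel f memo m v hmemo]
      exact ⟨hinv m v hmemo, hinv⟩
    | none =>
      have hget : d.get? m = none := pv_no_entry_get?_none d m hm
      rw [countMemo_succ_none d sel f memo m hmemo hget]
      exact ⟨(queryFuel_succ_none d.items.length d sel m hget).symm, hinv⟩
  | succ r ih =>
    intro m hm memo hinv f hf
    cases hmemo : memo.get? m with
    | some v =>
      rw [countMemo_succ_hit d sel f memo m v hmemo]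
      exact ⟨hinv m v hmemo, hinv⟩
    | none =>
      by_cases hmr : ∃ b, (m, b) ∈ pvElim sel r d.items
      · obtain ⟨b, hb⟩ := hmr
        have hout : (m, b) ∉ pvElim sel (r+1) d.items := hm b
        have hget : d.get? m = some b :=
          PySem.Dict.get?_of_mem_items d ((pvElim_sublist_le sel d.items (Nat.zero_le r)).subset hb) hnd
        cases hpart : (PySem.Dict.ofList b).get? "part" with
        | none =>
          rw [countMemo_succ_nopart d sel f memo m b hmemo hget hpart]
          exact ⟨(queryFuel_succ_nopart d.items.length d sel m b hget hpart).symm, hinv⟩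
        | some part =>
          have hparts : pvParts b = (PySem.Dict.ofList part).items := by
            unfold pvParts
            rw [PySem.Dict.getD_eq_get?_getD, hpart]
            rfl
          have Hrec : ∀ kv ∈ (PySem.Dict.ofList part).items, (kv.1 == sel) = false →
              ∀ memo₀, pvInv d sel memo₀ →
              (countMemo d sel f memo₀ kv.1).1 = queryFuel (d.items.length + 1) d sel kv.1 ∧
              pvInv d sel (countMemo d sel f memo₀ kv.1).2 := by
            intro kv hkv hsel memo₀ hinv₀
            have hrem := pvElim_removed sel d.items r (m, b) hb hout kv (hparts ▸ hkv) hsel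
            have hnok : ∀ b', (kv.1, b') ∉ pvElim sel r d.items := by
              intro b' hb'
              exact hrem (kv.1, b') hb' rfl
            obtain ⟨g, hg⟩ : ∃ g, f = g + 1 := ⟨f - 1, by omega⟩
            rw [hg]
            exact ih kv.1 hnok memo₀ hinv₀ g (by omega)
          obtain ⟨hfold1, hfold2⟩ := pv_fold d sel f (PySem.Dict.ofList part).items Hrec 0 memo hinv
          rw [countMemo_succ_part d sel f memo m b part hmemo hget hpart]
          rw [← pv_unfold d sel hnd hpre m b part hget hpart] at hfold1
          refine ⟨hfold1, ?_⟩
          intro k v hk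
          rw [PySem.Dict.get?_insert] at hk
          by_cases hkm : k = m
          · rw [if_pos hkm] at hk
            cases hk
            exact hkm ▸ hfold1
          · rw [if_neg hkm] at hk
            exact hfold2 k v hk
      · exact ih m (fun b hb => hmr ⟨b, hb⟩) memo hinv f (by omega)

-- ===== VERDICT (by name: the statement is the Claim_ definition above) =====
theorem query_spec : Claim_equal_query := by
  intro recipes sel p _ hpre
  unfold Spec_query query query_alt
  have hnd : (PySem.Dict.ofList recipes).keys.Nodup := PySem.Dict.nodup_keys_ofList recipes
  have hempty : ∀ b, (p, b) ∉ pvElim sel (PySem.Dict.ofList recipes).items.length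
      (PySem.Dict.ofList recipes).items := by
    intro b hb
    rw [hpre.1] at hb
    simp at hb
  have hinv : pvInv (PySem.Dict.ofList recipes) sel PySem.Dict.empty := by
    intro k v hk
    rw [PySem.Dict.get?_empty] at hk
    cases hk
  have h := pv_memo (PySem.Dict.ofList recipes) sel hnd hpre.1
    ((PySem.Dict.ofList recipes).items.length) p hempty PySem.Dict.empty hinv
    ((PySem.Dict.ofList recipes).items.length) (le_refl _)
  exact h.1.symm
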